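-- pv_equiv track=rewrite | github.com/hathaitoan643-cyber/237480201103_17DCNTT2_PYTHON | Chuong4/Bai 30.py | pos_string_suppercharcs
-- ===== SOURCE A (Python) =====
-- def pos_string_suppercharcs(ls):
--     vi_tri_max = -1
--     so_ky_tu_in_hoa_max = 0
--
--     for i, chuoi in enumerate(ls):
--         so_ky_tu_in_hoa = sum(1 for char in chuoi if char.isupper())
--         if so_ky_tu_in_hoa > so_ky_tu_in_hoa_max:
--             so_ky_tu_in_hoa_max = so_ky_tu_in_hoa
--             vi_tri_max = i
--
--     return vi_tri_max  # Trả về vị trí của chuỗi có ký tự in hoa lớn nhất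
-- ===== SOURCE B (Python) =====
-- def pos_string_suppercharcs(ls):
--     counts = [sum(1 for c in s if c.isupper()) for s in ls]
--     if not counts or max(counts) == 0:
--         return -1
--     return counts.index(max(counts))
-- ===== Notes on version B (the rewrite author's own statement) =====
-- stated objective: simpler
-- what changed: B precomputes a list of per-string uppercase counts and then selects the answer in a separate phase via max() and .index() (first occurrence), replacing A's fused running-max loop over enumerate with explicit sentinel state.
import Mathlib
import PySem

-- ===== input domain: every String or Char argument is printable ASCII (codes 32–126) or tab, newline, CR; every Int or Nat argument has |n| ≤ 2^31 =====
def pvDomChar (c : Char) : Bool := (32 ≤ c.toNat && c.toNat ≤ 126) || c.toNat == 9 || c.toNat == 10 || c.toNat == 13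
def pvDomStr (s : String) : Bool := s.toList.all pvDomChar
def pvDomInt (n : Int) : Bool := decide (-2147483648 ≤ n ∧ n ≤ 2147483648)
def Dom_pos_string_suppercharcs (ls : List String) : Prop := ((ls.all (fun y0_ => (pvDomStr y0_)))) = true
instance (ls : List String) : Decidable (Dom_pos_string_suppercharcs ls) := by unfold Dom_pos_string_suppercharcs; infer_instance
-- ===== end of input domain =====

-- B precomputes the per-string uppercase counts and then selects via max()/.index() in a
-- separate phase, instead of A's fused running-max loop; objective: simpler decomposition.

-- ===== PORT A =====
-- sum(1 for char in chuoi if char.isupper())  (shared by both Pythons verbatim)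
def pvCount (s : String) : Int :=
  s.toList.foldl (fun acc c => if PySem.Chars.isupper c then acc + 1 else acc) 0

def pos_string_suppercharcs (ls : List String) : Int :=
  ((PySem.List.enumerate ls 0).foldl
    (fun (st : Int × Int) (p : Int × String) =>
      let n := pvCount p.2
      if st.2 < n then (p.1, n) else st)
    (-1, 0)).1

-- ===== PORT B =====
def pos_string_suppercharcs_alt (ls : List String) : Int :=
  let counts := ls.map pvCount
  match PySem.List.max? counts (fun x => x) with
  | none => -1                -- not counts
  | some m =>
    if m = 0 then -1
    else
      match PySem.List.index? counts m with
      | some i => (i : Int)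
      | none => -1            -- unreachable: the max is a member of counts

-- ===== PRECONDITION & SPEC =====
def Spec_pos_string_suppercharcs (ls : List String) (out : Int) : Prop := out = pos_string_suppercharcs_alt ls
instance (ls : List String) (out : Int) : Decidable (Spec_pos_string_suppercharcs ls out) := by unfold Spec_pos_string_suppercharcs; infer_instance

-- ===== CLAIM (what is proved, stated in full; the proofs are below) =====
def Claim_equal_pos_string_suppercharcs : Prop := ∀ (ls : List String), Dom_pos_string_suppercharcs ls → Spec_pos_string_suppercharcs ls (pos_string_suppercharcs ls)

-- ===== LEMMAS AND PROOFS =====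

theorem pvCount_nonneg (s : String) : 0 ≤ pvCount s := by
  unfold pvCount
  have h : ∀ (l : List Char) (acc : Int),
      acc ≤ l.foldl (fun acc c => if PySem.Chars.isupper c then acc + 1 else acc) acc := by
    intro l
    induction l with
    | nil => intro acc; simp
    | cons c t ih =>
        intro acc
        simp only [List.foldl_cons]
        refine le_trans ?_ (ih _)
        split <;> omega
  exact h s.toList 0

theorem foldl_max_mem (t : List Int) (a : Int) :
    t.foldl max a = a ∨ t.foldl max a ∈ t := by
  induction t generalizing a with
  | nil => left; rfl
  | cons c t ih =>
      simp only [List.foldl_cons]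
      rcases ih (max a c) with h | h
      · rw [h]
        rcases le_total a c with hc | hc
        · right; simp [max_eq_right hc]
        · left; exact max_eq_left hc
      · right; simp [h]

theorem le_foldl_max (t : List Int) (a : Int) : a ≤ t.foldl max a := by
  induction t generalizing a with
  | nil => simp
  | cons c t ih => exact le_trans (le_max_left a c) (ih _)

-- A's loop reformulated over the list of counts
def loopA (cs : List Int) (i : Int) (st : Int × Int) : Int × Int :=
  match cs with
  | [] => st
  | c :: t => loopA t (i + 1) (if st.2 < c then (i, c) else st)

theorem enumerate_foldl_eq_loopA (ls : List String) (i : Int) (st : Int × Int) :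
    (PySem.List.enumerate ls i).foldl
      (fun (st : Int × Int) (p : Int × String) =>
        let n := pvCount p.2
        if st.2 < n then (p.1, n) else st) st
      = loopA (ls.map pvCount) i st := by
  induction ls generalizing i st with
  | nil => simp [PySem.List.enumerate_nil, loopA]
  | cons s t ih => simp [PySem.List.enumerate_cons, loopA, ih]

theorem loopA_fst (cs : List Int) (i pos best : Int) :
    (loopA cs i (pos, best)).1 =
      if best < cs.foldl max best
      then i + (((PySem.List.index? cs (cs.foldl max best)).getD 0 : Nat) : Int)
      else pos := by
  induction cs generalizing i pos best with
  | nil => simp [loopA]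
  | cons c t ih =>
      simp only [loopA, List.foldl_cons]
      by_cases hc : best < c
      · simp only [if_pos hc]
        rw [ih]
        have hmaxbc : max best c = c := max_eq_right (le_of_lt hc)
        rw [hmaxbc]
        have hcm : c ≤ t.foldl max c := le_foldl_max t c
        have houter : best < t.foldl max c := lt_of_lt_of_le hc hcm
        rw [if_pos houter]
        by_cases hlt : c < t.foldl max c
        · rw [if_pos hlt]
          have hne : c ≠ t.foldl max c := ne_of_lt hlt
          rw [PySem.List.index?_cons_of_ne _ hne]
          have hmem : t.foldl max c ∈ t := by
            rcases foldl_max_mem t c with h | h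
            · exact absurd h.symm (ne_of_lt hlt)
            · exact h
          rcases Option.isSome_iff_exists.mp ((PySem.List.index?_isSome_iff t (t.foldl max c)).2 hmem) with ⟨k, hk⟩
          rw [hk]
          simp only [Option.map_some, Option.getD_some]
          push_cast
          ring
        · have heq : c = t.foldl max c := le_antisymm hcm (not_lt.mp hlt)
          rw [← heq, PySem.List.index?_cons_self]
          simp
      · simp only [if_neg hc]
        rw [ih]
        have hmaxbc : max best c = best := max_eq_left (not_lt.mp hc)
        rw [hmaxbc]
        by_cases hb : best < t.foldl max best
        · rw [if_pos hb, if_pos hb]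
          have hne : c ≠ t.foldl max best := by
            intro h; rw [h] at hc; exact hc hb
          rw [PySem.List.index?_cons_of_ne _ hne]
          have hmem : t.foldl max best ∈ t := by
            rcases foldl_max_mem t best with h | h
            · exact absurd h.symm (ne_of_lt hb)
            · exact h
          rcases Option.isSome_iff_exists.mp ((PySem.List.index?_isSome_iff t (t.foldl max best)).2 hmem) with ⟨k, hk⟩
          rw [hk]
          simp only [Option.map_some, Option.getD_some]
          push_cast
          ring
        · rw [if_neg hb, if_neg hb]

-- selection phase of B, as a function of the counts list (proof helper)
def selB (counts : List Int) : Int :=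
  match PySem.List.max? counts (fun x => x) with
  | none => -1
  | some m =>
    if m = 0 then -1
    else
      match PySem.List.index? counts m with
      | some i => (i : Int)
      | none => -1

theorem alt_eq_selB (ls : List String) :
    pos_string_suppercharcs_alt ls = selB (ls.map pvCount) := rfl

-- ===== VERDICT (by name: the statement is the Claim_ definition above) =====
theorem pos_string_suppercharcs_spec : Claim_equal_pos_string_suppercharcs := by
  unfold Claim_equal_pos_string_suppercharcs
  intro ls _
  unfold Spec_pos_string_suppercharcs
  rw [alt_eq_selB]
  unfold pos_string_suppercharcs
  rw [enumerate_foldl_eq_loopA]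
  have hnn : ∀ c ∈ ls.map pvCount, (0:Int) ≤ c := by
    intro c hc
    rcases List.mem_map.mp hc with ⟨s, _, hs⟩
    rw [← hs]; exact pvCount_nonneg s
  generalize ls.map pvCount = counts at hnn ⊢
  cases counts with
  | nil => simp [loopA, selB, PySem.List.max?]
  | cons c t =>
      have hc0 : 0 ≤ c := hnn c List.mem_cons_self
      unfold selB
      rw [PySem.List.max?_id_cons]
      rw [loopA_fst]
      have hfold : (c :: t).foldl max 0 = t.foldl max c := by
        simp only [List.foldl_cons, max_eq_right hc0]
      rw [hfold]
      have hle : c ≤ t.foldl max c := le_foldl_max t c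
      by_cases hm : t.foldl max c = 0
      · simp [hm]
      · have hpos : (0 : Int) < t.foldl max c := lt_of_le_of_ne (le_trans hc0 hle) (Ne.symm hm)
        have hmem : t.foldl max c ∈ c :: t := by
          rcases foldl_max_mem t c with h | h
          · rw [h]; exact List.mem_cons_self
          · exact List.mem_cons_of_mem c h
        rcases Option.isSome_iff_exists.mp ((PySem.List.index?_isSome_iff (c :: t) (t.foldl max c)).2 hmem) with ⟨k, hk⟩
        rw [PySem.List.index?_eq_idxOf?] at hk
        simp [hm, hpos, hk]
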